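-- pv_equiv track=rewrite | github.com/cbh2071/model | data_utils.py | get_all_parents_of_term
-- ===== SOURCE A (Python) =====
-- from typing import Dict, List, Tuple, Set, Optional, Union
--
-- def get_all_parents_of_term(go_id: str, go2parents: Dict[str, Set[str]], include_self: bool = False) -> Set[str]:
--     """获取给定GO ID的所有父节点（祖先）的ID集合。"""
--     # (代码与之前版本相同)
--     parents_anc = set()
--     if include_self:
--         parents_anc.add(go_id)
--
--     q = {go_id}
--     visited = set()
--
--     while q:
--         term_id = q.pop()
--         if term_id not in visited and term_id in go2parents:
--             visited.add(term_id)
--             direct_parents = go2parents[term_id]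
--             parents_anc.update(direct_parents)
--             q.update(direct_parents)
--     return parents_anc
-- ===== SOURCE B (Python) =====
-- def get_all_parents_of_term(go_id, go2parents, include_self=False):
--     """All ancestors as the least fixpoint of one-round parent expansion:
--     repeatedly replace the reachable set by itself plus all direct parents of its
--     members until it stops growing, then take the union of the parent sets."""
--     reach = {go_id}
--     while True:
--         expanded = set(reach)
--         for t in reach:
--             expanded |= go2parents.get(t, set())
--         if len(expanded) == len(reach):
--             break
--         reach = expanded
--     result = {go_id} if include_self else set()
--     for t in reach:
--         result |= go2parents.get(t, set())
--     return result
-- ===== Notes on version B (the rewrite author's own statement) =====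
-- stated objective: alternative
-- what changed: Replaced the one-node-at-a-time worklist traversal (pending set, set.pop, visited set) by a round-based least-fixpoint computation: repeatedly expand the whole reachable set by all direct parents of its members until it stops growing, with no queue and no visited set, then union the parent sets of the reachable terms in a second pass.
import Mathlib
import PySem

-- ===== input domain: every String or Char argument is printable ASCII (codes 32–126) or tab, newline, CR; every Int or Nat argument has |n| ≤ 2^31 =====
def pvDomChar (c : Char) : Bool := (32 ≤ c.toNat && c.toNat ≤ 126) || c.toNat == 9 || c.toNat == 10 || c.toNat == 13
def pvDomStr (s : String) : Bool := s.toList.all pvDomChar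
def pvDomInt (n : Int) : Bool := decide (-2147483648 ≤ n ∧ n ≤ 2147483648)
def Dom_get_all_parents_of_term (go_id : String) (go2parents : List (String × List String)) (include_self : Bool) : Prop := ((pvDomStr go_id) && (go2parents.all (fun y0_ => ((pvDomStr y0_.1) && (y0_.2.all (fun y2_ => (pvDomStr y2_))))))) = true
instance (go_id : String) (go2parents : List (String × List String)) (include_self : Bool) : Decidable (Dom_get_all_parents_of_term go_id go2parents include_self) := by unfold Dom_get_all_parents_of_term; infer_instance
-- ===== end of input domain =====

-- B replaces A's one-node-at-a-time worklist (pending set + visited set) by a round-based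
-- least-fixpoint computation: expand the whole reachable set by all direct parents of its
-- members until it stops growing, then union the parent sets (objective: alternative algorithm).
-- Both Pythons return a SET; Python's set iteration order is not modelled, so the ports fix
-- first-insertion order for every set and first-inserted-element pop for A's 'q.pop()'.

-- ===== PORT A =====
-- Bool bridge for set membership tests, cited throughout
theorem pvContains_eq (s : PySem.Set String) (x : String) :
    PySem.Set.contains s x = decide (x ∈ s) := by
  by_cases h : x ∈ s
  · simp [PySem.Set.contains_iff, h]
  · simp [h]

-- strict decrease of a countP under a pointwise-stronger predicate, cited by pvALoop's decreasing_by
theorem pvCountP_lt {α : Type} (p q : α → Bool) (l : List α) (h : ∀ x ∈ l, p x → q x)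
    (a : α) (ha : a ∈ l) (hqa : q a = true) (hpa : p a = false) : l.countP p < l.countP q := by
  induction l with
  | nil => cases ha
  | cons b l ih =>
    have hmono := List.countP_mono_left (p := p) (q := q) (l := l)
      (fun x hx => h x (List.mem_cons_of_mem b hx))
    have hb : ((if p b = true then 1 else 0) : Nat) ≤ (if q b = true then 1 else 0) := by
      by_cases hpb : p b = true
      · have := h b List.mem_cons_self hpb; simp [hpb, this]
      · simp [hpb]
    rcases List.mem_cons.mp ha with rfl | ha'
    · simp only [List.countP_cons, hpa, hqa]
      norm_num
      omega
    · have := ih (fun x hx => h x (List.mem_cons_of_mem b hx)) ha'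
      simp only [List.countP_cons]
      omega

theorem pvVisCount_lt {d : List (String × List String)} {vis : PySem.Set String} {t : String}
    (hK : t ∈ d.map Prod.fst) (hv : t ∉ vis) :
    (d.map Prod.fst).countP (fun k => !(PySem.Set.contains (PySem.Set.add vis t) k)) <
      (d.map Prod.fst).countP (fun k => !(PySem.Set.contains vis k)) := by
  apply pvCountP_lt _ _ _ _ t hK
  · simp [PySem.Set.contains_iff, hv]
  · simp [PySem.Set.contains_iff, PySem.Set.mem_add]
  · intro x _ hx
    simp [pvContains_eq, PySem.Set.mem_add, not_or] at hx ⊢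
    exact hx.1

theorem pvGet_mem_keys {d : List (String × List String)} {t : String} {ps : List String}
    (h : PySem.Dict.get? ⟨d⟩ t = some ps) : t ∈ d.map Prod.fst := by
  simp only [PySem.Dict.get?, Option.map_eq_some_iff] at h
  obtain ⟨pr, hfind, rfl⟩ := h
  have hmem := List.mem_of_find?_eq_some hfind
  have heq := List.find?_some hfind
  simp only [beq_iff_eq] at heq
  subst heq
  exact List.mem_map_of_mem hmem

theorem pvGet_subset_flat {d : List (String × List String)} {t : String} {ps : List String}
    (h : PySem.Dict.get? ⟨d⟩ t = some ps) : ∀ p ∈ ps, p ∈ d.flatMap Prod.snd := by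
  simp only [PySem.Dict.get?, Option.map_eq_some_iff] at h
  obtain ⟨pr, hfind, rfl⟩ := h
  have hmem := List.mem_of_find?_eq_some hfind
  intro p hp
  exact List.mem_flatMap.mpr ⟨pr, hmem, hp⟩

-- A's while loop: pop the first-inserted pending term, mark visited at processing time,
-- bulk-update the accumulator and the pending set with the parent list.
def pvALoop (d : List (String × List String)) (anc q visited : PySem.Set String) : List String :=
  match q with
  | [] => anc
  | t :: rest =>
    if hv : PySem.Set.contains visited t then pvALoop d anc rest visited
    else
      match hps : PySem.Dict.get? ⟨d⟩ t with
      | some direct_parents =>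
          pvALoop d (PySem.Set.update anc direct_parents)
            (PySem.Set.update rest direct_parents) (PySem.Set.add visited t)
      | none => pvALoop d anc rest visited
termination_by (((d.map Prod.fst).countP (fun k => !(PySem.Set.contains visited k))), q.length)
decreasing_by
  · exact Prod.Lex.right _ (Nat.lt_succ_self _)
  · apply Prod.Lex.left
    exact pvVisCount_lt (pvGet_mem_keys hps)
      (by simpa [PySem.Set.contains_eq_listContains, List.contains_iff_mem] using hv)
  · exact Prod.Lex.right _ (Nat.lt_succ_self _)

def get_all_parents_of_term (go_id : String) (go2parents : List (String × List String)) (include_self : Bool) : List String :=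
  let parents_anc : PySem.Set String := PySem.Set.empty
  let parents_anc := if include_self then PySem.Set.add parents_anc go_id else parents_anc
  let q : PySem.Set String := PySem.Set.add PySem.Set.empty go_id
  let visited : PySem.Set String := PySem.Set.empty
  pvALoop go2parents parents_anc q visited

-- ===== PORT B =====
-- one pass of 'for t in l: acc |= go2parents.get(t, set())'
def pvF (d : List (String × List String)) (l : List String) (a : PySem.Set String) : PySem.Set String :=
  l.foldl (fun a t => PySem.Set.update a (PySem.Dict.getD ⟨d⟩ t [])) a

-- pvF only appends, cited by pvRounds's decreasing_by
theorem pvF_prefix (d : List (String × List String)) :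
    ∀ (l : List String) (a : PySem.Set String), ∃ e, pvF d l a = a ++ e := by
  intro l
  induction l with
  | nil => intro a; exact ⟨[], (List.append_nil a).symm⟩
  | cons t l ih =>
    intro a
    obtain ⟨e, he⟩ := ih (PySem.Set.update a (PySem.Dict.getD ⟨d⟩ t []))
    refine ⟨(PySem.Set.ofList (PySem.Dict.getD ⟨d⟩ t [])).filter
      (fun y => !(PySem.Set.contains a y)) ++ e, ?_⟩
    show pvF d l (PySem.Set.update a (PySem.Dict.getD ⟨d⟩ t [])) = _
    rw [he, PySem.Set.update_eq_append_filter, List.append_assoc]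

theorem pvF_nodup (d : List (String × List String)) :
    ∀ (l : List String) (a : PySem.Set String), a.Nodup → (pvF d l a).Nodup := by
  intro l
  induction l with
  | nil => intro a h; exact h
  | cons t l ih => intro a h; exact ih _ (PySem.Set.nodup_update _ _ h)

theorem pvGetD_sub (d : List (String × List String)) (t p : String)
    (hp : p ∈ PySem.Dict.getD ⟨d⟩ t []) : p ∈ d.flatMap Prod.snd := by
  rcases hg : PySem.Dict.get? (⟨d⟩ : PySem.Dict String (List String)) t with _ | ps
  · simp [PySem.Dict.getD, hg] at hp
  · have : PySem.Dict.getD (⟨d⟩ : PySem.Dict String (List String)) t [] = ps := by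
      simp [PySem.Dict.getD, hg]
    rw [this] at hp
    exact pvGet_subset_flat hg p hp

theorem pvF_sub (g : String) (d : List (String × List String)) :
    ∀ (l : List String) (a : PySem.Set String),
      a ⊆ g :: d.flatMap Prod.snd → pvF d l a ⊆ g :: d.flatMap Prod.snd := by
  intro l
  induction l with
  | nil => intro a h; exact h
  | cons t l ih =>
    intro a h
    apply ih
    intro x hx
    rcases (PySem.Set.mem_update a _ x).mp hx with hx | hx
    · exact h hx
    · exact List.mem_cons_of_mem _ (pvGetD_sub d t x hx)

theorem pvLen_le {l m : List String} (hn : l.Nodup) (hs : l ⊆ m) : l.length ≤ m.length := by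
  calc l.length = l.toFinset.card := (List.toFinset_card_of_nodup hn).symm
    _ ≤ m.toFinset.card := Finset.card_le_card (fun x hx => by
        simp only [List.mem_toFinset] at hx ⊢; exact hs hx)
    _ ≤ m.length := m.toFinset_card_le

-- B's 'while True' loop: expand the whole reachable set by all parents of its members;
-- stop when its size no longer grows (the two invariant arguments only justify termination)
def pvRounds (g : String) (d : List (String × List String)) (r : List String)
    (hn : r.Nodup) (hs : r ⊆ g :: d.flatMap Prod.snd) : List String :=
  if he : (pvF d r r).length = r.length then r
  else pvRounds g d (pvF d r r) (pvF_nodup d r r hn) (pvF_sub g d r r hs)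
termination_by (g :: d.flatMap Prod.snd).length + 1 - r.length
decreasing_by
  obtain ⟨e, hpre⟩ := pvF_prefix d r r
  have h1 : (pvF d r r).length ≤ (g :: d.flatMap Prod.snd).length :=
    pvLen_le (pvF_nodup d r r hn) (pvF_sub g d r r hs)
  have h2 : (pvF d r r).length = r.length + e.length := by rw [hpre, List.length_append]
  omega

def get_all_parents_of_term_alt (go_id : String) (go2parents : List (String × List String)) (include_self : Bool) : List String :=
  let reach := pvRounds go_id go2parents [go_id] (List.nodup_singleton _)
    (fun x hx => by rw [List.mem_singleton] at hx; exact hx ▸ List.mem_cons_self)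
  let result : PySem.Set String :=
    if include_self then PySem.Set.add PySem.Set.empty go_id else PySem.Set.empty
  pvF go2parents reach result

-- ===== PRECONDITION & SPEC =====
def Spec_get_all_parents_of_term (go_id : String) (go2parents : List (String × List String)) (include_self : Bool) (out : List String) : Prop := out = get_all_parents_of_term_alt go_id go2parents include_self
instance (go_id : String) (go2parents : List (String × List String)) (include_self : Bool) (out : List String) : Decidable (Spec_get_all_parents_of_term go_id go2parents include_self out) := by unfold Spec_get_all_parents_of_term; infer_instance

-- ===== CLAIM (what is proved, stated in full; the proofs are below) =====
def Claim_equal_get_all_parents_of_term : Prop := ∀ (go_id : String) (go2parents : List (String × List String)) (include_self : Bool), Dom_get_all_parents_of_term go_id go2parents include_self → Spec_get_all_parents_of_term go_id go2parents include_self (get_all_parents_of_term go_id go2parents include_self)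

-- ===== LEMMAS AND PROOFS =====

-- The proof goes through an intermediate FIFO worklist process:
--   pvBLoop/pvSeq2 : enqueue-dedup BFS over the parent graph
--   pvSim          : A's set-worklist loop = pvBLoop         (bisimulation)
--   pvBLoop_eq_F   : pvBLoop's result = pvF over pvSeq2's discovery list
--   pvRounds_eq_seq: B's fixpoint rounds produce pvSeq2's discovery list

def pvBInner (ps : List String) (st : PySem.Set String × List String × PySem.Set String) :
    PySem.Set String × List String × PySem.Set String :=
  ps.foldl (fun st p =>
    let res := PySem.Set.add st.1 p
    if PySem.Set.contains st.2.2 p then (res, st.2.1, st.2.2)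
    else (res, st.2.1 ++ [p], PySem.Set.add st.2.2 p)) st

-- closed form of the inner loop, cited by pvBLoop's decreasing_by
theorem pvBInner_eq (ps : List String) (res : PySem.Set String) (qu : List String)
    (seen : PySem.Set String) :
    pvBInner ps (res, qu, seen) =
      (PySem.Set.update res ps,
       qu ++ (PySem.Set.ofList ps).filter (fun p => !(PySem.Set.contains seen p)),
       PySem.Set.update seen ps) := by
  induction ps generalizing res qu seen with
  | nil => simp [pvBInner, PySem.Set.update]
  | cons p ps ih =>
    by_cases hp : p ∈ seen
    · have h1 : PySem.Set.contains seen p = true := by simp [pvContains_eq, hp]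
      have step : pvBInner (p :: ps) (res, qu, seen) = pvBInner ps (PySem.Set.add res p, qu, seen) := by
        simp [pvBInner, List.foldl_cons, hp]
      rw [step, ih]
      simp only [Prod.mk.injEq]
      refine ⟨?_, ?_, ?_⟩
      · rw [PySem.Set.update_cons]
      · rw [PySem.Set.ofList_cons]
        simp only [List.filter_cons, h1, Bool.not_true]
        congr 1
        rw [show (PySem.Set.discard (PySem.Set.ofList ps) p) = (PySem.Set.ofList ps).filter (fun y => !(y == p)) from rfl]
        rw [List.filter_filter]
        apply List.filter_congr
        intro y hy
        by_cases hyp : y = p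
        · subst hyp; simp [pvContains_eq, hp]
        · simp [hyp]
      · rw [PySem.Set.update_cons]
        congr 1
        exact (PySem.Set.add_of_mem hp).symm
    · have h1 : PySem.Set.contains seen p = false := by simp [pvContains_eq, hp]
      have step : pvBInner (p :: ps) (res, qu, seen) = pvBInner ps (PySem.Set.add res p, qu ++ [p], PySem.Set.add seen p) := by
        simp [pvBInner, List.foldl_cons, hp]
      rw [step, ih]
      simp only [Prod.mk.injEq]
      refine ⟨?_, ?_, ?_⟩
      · rw [PySem.Set.update_cons]
      · rw [PySem.Set.ofList_cons]
        simp only [List.filter_cons, h1, Bool.not_false, List.append_assoc, List.singleton_append]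
        rw [if_pos trivial]
        congr 1
        rw [show (PySem.Set.discard (PySem.Set.ofList ps) p) = (PySem.Set.ofList ps).filter (fun y => !(y == p)) from rfl]
        rw [List.filter_filter]
        congr 1
        apply List.filter_congr
        intro y hy
        by_cases hyp : y = p
        · subst hyp; simp [pvContains_eq, PySem.Set.mem_add]
        · simp [hyp, pvContains_eq, PySem.Set.mem_add]
      · rw [PySem.Set.update_cons]

theorem pvBInner_lex (d : List (String × List String)) (t : String)
    (rest : List String) (res seen : PySem.Set String) :
    Prod.Lex Nat.lt Nat.lt
      ((d.flatMap Prod.snd).countP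
          (fun k => !(PySem.Set.contains (pvBInner (PySem.Dict.getD ⟨d⟩ t []) (res, rest, seen)).2.2 k)),
        (pvBInner (PySem.Dict.getD ⟨d⟩ t []) (res, rest, seen)).2.1.length)
      ((d.flatMap Prod.snd).countP (fun k => !(PySem.Set.contains seen k)), (t :: rest).length) := by
  rcases hg : PySem.Dict.get? ⟨d⟩ t with _ | ps
  · have hps : PySem.Dict.getD ⟨d⟩ t [] = [] := by simp [PySem.Dict.getD, hg]
    rw [hps, pvBInner_eq]
    simp only [PySem.Set.ofList_nil, List.filter_nil, List.append_nil]
    exact Prod.Lex.right _ (Nat.lt_succ_self _)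
  · have hps : PySem.Dict.getD ⟨d⟩ t [] = ps := by simp [PySem.Dict.getD, hg]
    rw [hps, pvBInner_eq]
    rcases hnew : (PySem.Set.ofList ps).filter (fun p => !(PySem.Set.contains seen p)) with _ | ⟨p, tl⟩
    · have hseen : PySem.Set.update seen ps = seen := by
        rw [PySem.Set.update_eq_append_filter, hnew, List.append_nil]
      simp only [hseen, hnew, List.append_nil]
      exact Prod.Lex.right _ (Nat.lt_succ_self _)
    · apply Prod.Lex.left
      have hpmem : p ∈ (PySem.Set.ofList ps).filter (fun p => !(PySem.Set.contains seen p)) := by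
        rw [hnew]; exact List.mem_cons_self
      have hpf := List.mem_filter.mp hpmem
      have hpps : p ∈ ps := by
        have := hpf.1; exact (PySem.Set.mem_ofList _ _).mp this
      have hpseen : p ∉ seen := by
        have := hpf.2
        simpa [pvContains_eq] using this
      apply pvCountP_lt _ _ _ _ p (pvGet_subset_flat hg p hpps)
      · simp [pvContains_eq, hpseen]
      · simp only [pvContains_eq, Bool.not_eq_false', decide_eq_true_eq]
        rw [PySem.Set.update_eq_append_filter, hnew]
        simp
      · intro x _ hx
        simp only [pvContains_eq, Bool.not_eq_eq_eq_not, Bool.not_true, decide_eq_false_iff_not] at hx ⊢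
        intro hxs
        exact hx (by rw [PySem.Set.update_eq_append_filter]; exact List.mem_append_left _ hxs)

-- FIFO worklist with enqueue-time dedup, result accumulator threaded through
def pvBLoop (d : List (String × List String)) (res : PySem.Set String) (queue : List String)
    (seen : PySem.Set String) : List String :=
  match queue with
  | [] => res
  | t :: rest =>
    let st := pvBInner (PySem.Dict.getD ⟨d⟩ t []) (res, rest, seen)
    pvBLoop d st.1 st.2.1 st.2.2
termination_by (((d.flatMap Prod.snd).countP (fun k => !(PySem.Set.contains seen k))), queue.length)
decreasing_by
  exact pvBInner_lex d t rest res seen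

-- the discovery-list process: same FIFO worklist, tracking only (seen, queue)
def pvSeq2 (d : List (String × List String)) (seen : PySem.Set String) (queue : List String) : List String :=
  match queue with
  | [] => seen
  | t :: rest =>
      pvSeq2 d (PySem.Set.update seen (PySem.Dict.getD ⟨d⟩ t []))
        (rest ++ (PySem.Set.ofList (PySem.Dict.getD ⟨d⟩ t [])).filter
          (fun p => !(PySem.Set.contains seen p)))
termination_by (((d.flatMap Prod.snd).countP (fun k => !(PySem.Set.contains seen k))), queue.length)
decreasing_by
  have h := pvBInner_lex d t rest PySem.Set.empty seen
  rw [pvBInner_eq] at h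
  exact h

-- mapped-and-unvisited subsequence of A's pending set
def pvEffA (d : List (String × List String)) (vis : PySem.Set String) (q : List String) : List String :=
  q.filter (fun t => (PySem.Dict.get? ⟨d⟩ t).isSome && !(PySem.Set.contains vis t))

-- mapped subsequence of the worklist queue
def pvEffB (d : List (String × List String)) (queue : List String) : List String :=
  queue.filter (fun t => (PySem.Dict.get? ⟨d⟩ t).isSome)

-- the bisimulation invariant between A's state (anc, q, vis) and the worklist state (res, queue, seen)
def pvInv (g : String) (d : List (String × List String))
    (anc q vis res : List String) (queue seen : List String) : Prop :=
  anc = res ∧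
  pvEffA d vis q = pvEffB d queue ∧
  (∀ p : String, (PySem.Dict.get? ⟨d⟩ p).isSome → (p ∈ seen ↔ p ∈ vis ∨ p ∈ q)) ∧
  q.Nodup ∧ queue.Nodup ∧
  (∀ t ∈ queue, t ∈ seen) ∧
  (∀ t ∈ queue, (PySem.Dict.get? ⟨d⟩ t).isSome → t ∉ vis) ∧
  (∀ t ∈ q, t ∈ g :: d.flatMap Prod.snd)

def pvM (g : String) (d : List (String × List String)) (vis q : List String) : Nat :=
  (d.map Prod.fst).countP (fun k => !(PySem.Set.contains vis k)) * ((d.flatMap Prod.snd).length + 2)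
    + q.length

theorem pvBLoop_skip {d : List (String × List String)} {t : String}
    (res : PySem.Set String) (rest : List String) (seen : PySem.Set String)
    (h : PySem.Dict.get? ⟨d⟩ t = none) :
    pvBLoop d res (t :: rest) seen = pvBLoop d res rest seen := by
  rw [pvBLoop]
  have hps : PySem.Dict.getD (⟨d⟩ : PySem.Dict String (List String)) t [] = [] := by
    simp [PySem.Dict.getD, h]
  simp [hps, pvBInner]

theorem pvBLoop_skips {d : List (String × List String)} (junk : List String)
    (res : PySem.Set String) (rest : List String) (seen : PySem.Set String)
    (h : ∀ t ∈ junk, PySem.Dict.get? ⟨d⟩ t = none) :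
    pvBLoop d res (junk ++ rest) seen = pvBLoop d res rest seen := by
  induction junk with
  | nil => rfl
  | cons t junk ih =>
    rw [List.cons_append, pvBLoop_skip res (junk ++ rest) seen (h t List.mem_cons_self)]
    exact ih (fun x hx => h x (List.mem_cons_of_mem t hx))

theorem pvBLoop_all_junk {d : List (String × List String)} (queue : List String)
    (res : PySem.Set String) (seen : PySem.Set String)
    (h : ∀ t ∈ queue, PySem.Dict.get? ⟨d⟩ t = none) :
    pvBLoop d res queue seen = res := by
  have := pvBLoop_skips queue res [] seen h
  rw [List.append_nil] at this
  rw [this, pvBLoop]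

theorem pvALoop_skip_vis {d : List (String × List String)} {t : String}
    (anc rest vis : PySem.Set String) (h : PySem.Set.contains vis t = true) :
    pvALoop d anc (t :: rest) vis = pvALoop d anc rest vis := by
  rw [pvALoop, dif_pos h]

theorem pvALoop_skip_unmapped {d : List (String × List String)} {t : String}
    (anc rest vis : PySem.Set String) (hv : PySem.Set.contains vis t = false)
    (hg : PySem.Dict.get? ⟨d⟩ t = none) :
    pvALoop d anc (t :: rest) vis = pvALoop d anc rest vis := by
  rw [pvALoop, dif_neg (by simp [pvContains_eq] at hv; simp [hv])]
  split
  · rename_i heq; rw [hg] at heq; cases heq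
  · rfl

theorem pvALoop_step {d : List (String × List String)} {t : String} {ps : List String}
    (anc rest vis : PySem.Set String) (hv : PySem.Set.contains vis t = false)
    (hg : PySem.Dict.get? ⟨d⟩ t = some ps) :
    pvALoop d anc (t :: rest) vis =
      pvALoop d (PySem.Set.update anc ps) (PySem.Set.update rest ps) (PySem.Set.add vis t) := by
  rw [pvALoop, dif_neg (by simp [pvContains_eq] at hv; simp [hv])]
  split
  · rename_i heq; rw [hg] at heq; cases heq; rfl
  · rename_i heq; rw [hg] at heq; cases heq

theorem pvBLoop_step {d : List (String × List String)} {t : String} {ps : List String}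
    (res : PySem.Set String) (l2 : List String) (seen : PySem.Set String)
    (hg : PySem.Dict.get? ⟨d⟩ t = some ps) :
    pvBLoop d res (t :: l2) seen =
      pvBLoop d (PySem.Set.update res ps)
        (l2 ++ (PySem.Set.ofList ps).filter (fun p => !(PySem.Set.contains seen p)))
        (PySem.Set.update seen ps) := by
  rw [pvBLoop]
  have hps : PySem.Dict.getD (⟨d⟩ : PySem.Dict String (List String)) t [] = ps := by
    simp [PySem.Dict.getD, hg]
  rw [hps, pvBInner_eq]

-- the heart: A's enqueue-dedup against the pending set equals the worklist's dedup against 'seen'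
theorem pvKey {d : List (String × List String)} {t : String} (ps rest vis seen : List String)
    (h3 : ∀ p : String, (PySem.Dict.get? ⟨d⟩ p).isSome →
      (p ∈ seen ↔ p ∈ vis ∨ p ∈ t :: rest))
    (hv : t ∉ vis) :
    ((PySem.Set.ofList ps).filter (fun p => !(PySem.Set.contains rest p))).filter
        (fun p => (PySem.Dict.get? ⟨d⟩ p).isSome && !(PySem.Set.contains (PySem.Set.add vis t) p))
      = ((PySem.Set.ofList ps).filter (fun p => !(PySem.Set.contains seen p))).filter
          (fun p => (PySem.Dict.get? ⟨d⟩ p).isSome) := by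
  rw [List.filter_filter, List.filter_filter]
  apply List.filter_congr
  intro y _
  by_cases hm : (PySem.Dict.get? ⟨d⟩ y).isSome
  · have := h3 y hm
    simp only [List.mem_cons] at this
    by_cases hys : y ∈ seen <;>
      by_cases hyv : y ∈ vis <;>
        by_cases hyt : y = t <;>
          by_cases hyr : y ∈ rest <;>
            simp_all [pvContains_eq, PySem.Set.mem_add]
  · simp [hm]

theorem pvSim_nil (g : String) (d : List (String × List String))
    (anc vis res queue seen : List String)
    (hI : pvInv g d anc [] vis res queue seen) :
    pvALoop d anc [] vis = pvBLoop d res queue seen := by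
  obtain ⟨h1, h2, _, _, _, _, _, _⟩ := hI
  rw [pvALoop, pvBLoop_all_junk queue res seen ?_]
  · exact h1
  · intro x hx
    have hnil : pvEffB d queue = [] := by rw [← h2]; rfl
    have := List.filter_eq_nil_iff.mp hnil x hx
    exact Option.not_isSome_iff_eq_none.mp (by simpa using this)

theorem pvSim (g : String) (d : List (String × List String)) :
    ∀ (n : Nat) (anc q vis res queue seen : List String),
      pvM g d vis q ≤ n → pvInv g d anc q vis res queue seen →
      pvALoop d anc q vis = pvBLoop d res queue seen := by
  intro n
  induction n with
  | zero =>
    intro anc q vis res queue seen hM hI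
    match q with
    | [] => exact pvSim_nil g d anc vis res queue seen hI
    | t :: rest =>
      exfalso
      unfold pvM at hM
      simp only [List.length_cons] at hM
      omega
  | succ n ih =>
    intro anc q vis res queue seen hM hI
    match q with
    | [] => exact pvSim_nil g d anc vis res queue seen hI
    | t :: rest =>
      obtain ⟨h1, h2, h3, h4, h5, h6, h7, h8⟩ := hI
      have h4r : rest.Nodup := (List.nodup_cons.mp h4).2
      have htr : t ∉ rest := (List.nodup_cons.mp h4).1
      by_cases hvt : t ∈ vis
      · -- junk pop: t already visited
        have hvc : PySem.Set.contains vis t = true := by simp [pvContains_eq, hvt]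
        rw [pvALoop_skip_vis anc rest vis hvc]
        apply ih anc rest vis res queue seen
        · unfold pvM at hM ⊢; simp only [List.length_cons] at hM; omega
        · refine ⟨h1, ?_, ?_, h4r, h5, h6, h7,
            fun x hx => h8 x (List.mem_cons_of_mem t hx)⟩
          · rw [← h2]
            unfold pvEffA
            rw [List.filter_cons]
            simp [pvContains_eq, hvt]
          · intro p hp
            have := h3 p hp
            simp only [List.mem_cons] at this
            constructor
            · intro hps
              rcases this.mp hps with hv' | rfl | hr
              · exact Or.inl hv'
              · exact Or.inl hvt
              · exact Or.inr hr
            · rintro (h | h)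
              · exact this.mpr (Or.inl h)
              · exact this.mpr (Or.inr (Or.inr h))
      · have hvc : PySem.Set.contains vis t = false := by simp [pvContains_eq, hvt]
        rcases hg : PySem.Dict.get? (⟨d⟩ : PySem.Dict String (List String)) t with _ | ps
        · -- junk pop: t has no parents entry
          rw [pvALoop_skip_unmapped anc rest vis hvc hg]
          apply ih anc rest vis res queue seen
          · unfold pvM at hM ⊢; simp only [List.length_cons] at hM; omega
          · refine ⟨h1, ?_, ?_, h4r, h5, h6, h7,
              fun x hx => h8 x (List.mem_cons_of_mem t hx)⟩
            · rw [← h2]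
              unfold pvEffA
              rw [List.filter_cons]
              simp [hg]
            · intro p hp
              have hpt : p ≠ t := by
                intro hpe; rw [hpe, hg] at hp; simp at hp
              have := h3 p hp
              simp only [List.mem_cons] at this
              constructor
              · intro hps
                rcases this.mp hps with hv' | he | hr
                · exact Or.inl hv'
                · exact absurd he hpt
                · exact Or.inr hr
              · rintro (h | h)
                · exact this.mpr (Or.inl h)
                · exact this.mpr (Or.inr (Or.inr h))
        · -- effective pop
          rw [pvALoop_step anc rest vis hvc hg]
          have hps_flat := pvGet_subset_flat hg
          have hefft : pvEffA d vis (t :: rest) = t :: pvEffA d vis rest := by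
            unfold pvEffA
            rw [List.filter_cons]
            simp [hg, pvContains_eq, hvt]
          have h2' : List.filter (fun x => (PySem.Dict.get? (⟨d⟩ : PySem.Dict String (List String)) x).isSome) queue
              = t :: pvEffA d vis rest := by
            have := h2
            unfold pvEffB at this
            rw [← this, hefft]
          obtain ⟨l₁, l₂, hqu, hl₁, _, hl₂⟩ := List.filter_eq_cons_iff.mp h2'
          subst hqu
          have hl₁' : ∀ x ∈ l₁, PySem.Dict.get? (⟨d⟩ : PySem.Dict String (List String)) x = none :=
            fun x hx => Option.not_isSome_iff_eq_none.mp (by simpa using hl₁ x hx)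
          rw [pvBLoop_skips l₁ res (t :: l₂) seen hl₁']
          rw [pvBLoop_step res l₂ seen hg]
          have h5' : (t :: l₂).Nodup := List.Nodup.of_append_right h5
          have htl₂ : t ∉ l₂ := (List.nodup_cons.mp h5').1
          have h5l₂ : l₂.Nodup := (List.nodup_cons.mp h5').2
          have htq : t ∈ l₁ ++ t :: l₂ := List.mem_append_right _ List.mem_cons_self
          apply ih (PySem.Set.update anc ps) (PySem.Set.update rest ps) (PySem.Set.add vis t)
            (PySem.Set.update res ps)
            (l₂ ++ (PySem.Set.ofList ps).filter (fun p => !(PySem.Set.contains seen p)))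
            (PySem.Set.update seen ps)
          · -- the measure decreases
            have hC := pvVisCount_lt (pvGet_mem_keys hg) hvt
            have hq'sub : PySem.Set.update rest ps ⊆ g :: d.flatMap Prod.snd := by
              intro x hx
              rcases (PySem.Set.mem_update rest ps x).mp hx with hx | hx
              · exact h8 x (List.mem_cons_of_mem t hx)
              · exact List.mem_cons_of_mem _ (hps_flat x hx)
            have hq'len : (PySem.Set.update rest ps).length ≤ (d.flatMap Prod.snd).length + 1 := by
              have := pvLen_le (PySem.Set.nodup_update rest ps h4r) hq'sub
              simpa using this
            unfold pvM at hM ⊢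
            have hmul : ((d.map Prod.fst).countP
                  (fun k => !(PySem.Set.contains (PySem.Set.add vis t) k)))
                    * ((d.flatMap Prod.snd).length + 2) + ((d.flatMap Prod.snd).length + 2)
                ≤ ((d.map Prod.fst).countP (fun k => !(PySem.Set.contains vis k)))
                    * ((d.flatMap Prod.snd).length + 2) := by
              calc ((d.map Prod.fst).countP
                    (fun k => !(PySem.Set.contains (PySem.Set.add vis t) k)))
                      * ((d.flatMap Prod.snd).length + 2) + ((d.flatMap Prod.snd).length + 2)
                  = (((d.map Prod.fst).countP
                    (fun k => !(PySem.Set.contains (PySem.Set.add vis t) k))) + 1)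
                      * ((d.flatMap Prod.snd).length + 2) := by ring
                _ ≤ _ := Nat.mul_le_mul_right _ hC
            simp only [List.length_cons] at hM
            omega
          · -- the invariant is preserved
            refine ⟨by rw [h1], ?_, ?_, PySem.Set.nodup_update rest ps h4r, ?_, ?_, ?_, ?_⟩
            · unfold pvEffA pvEffB
              rw [PySem.Set.update_eq_append_filter rest ps]
              rw [List.filter_append, List.filter_append]
              congr 1
              · rw [hl₂]
                unfold pvEffA
                apply List.filter_congr
                intro x hx
                have hxt : x ≠ t := fun he => htr (he ▸ hx)
                simp [pvContains_eq, PySem.Set.mem_add, hxt]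
              · exact pvKey ps rest vis seen h3 hvt
            · intro p hp
              have hold := h3 p hp
              simp only [List.mem_cons] at hold
              rw [PySem.Set.mem_update, PySem.Set.mem_add, PySem.Set.mem_update]
              constructor
              · rintro (hs | hps)
                · rcases hold.mp hs with hv' | rfl | hr
                  · exact Or.inl (Or.inl hv')
                  · exact Or.inl (Or.inr rfl)
                  · exact Or.inr (Or.inl hr)
                · exact Or.inr (Or.inr hps)
              · rintro ((hv' | rfl) | (hr | hps))
                · exact Or.inl (hold.mpr (Or.inl hv'))
                · exact Or.inl (hold.mpr (Or.inr (Or.inl rfl)))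
                · exact Or.inl (hold.mpr (Or.inr (Or.inr hr)))
                · exact Or.inr hps
            · apply List.Nodup.append h5l₂ (List.Nodup.filter _ (PySem.Set.nodup_ofList ps))
              intro x hx₁ hx₂
              have hxs : x ∈ seen :=
                h6 x (List.mem_append_right _ (List.mem_cons_of_mem t hx₁))
              have := (List.mem_filter.mp hx₂).2
              simp [pvContains_eq, hxs] at this
            · intro x hx
              rcases List.mem_append.mp hx with hx | hx
              · exact (PySem.Set.mem_update seen ps x).mpr
                  (Or.inl (h6 x (List.mem_append_right _ (List.mem_cons_of_mem t hx))))
              · exact (PySem.Set.mem_update seen ps x).mpr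
                  (Or.inr ((PySem.Set.mem_ofList _ _).mp (List.mem_filter.mp hx).1))
            · intro x hx hxm
              rw [PySem.Set.mem_add]
              rintro (hxv | rfl)
              · rcases List.mem_append.mp hx with hx | hx
                · exact h7 x (List.mem_append_right _ (List.mem_cons_of_mem t hx)) hxm hxv
                · have hxs : x ∈ seen := (h3 x hxm).mpr (Or.inl hxv)
                  have := (List.mem_filter.mp hx).2
                  simp [pvContains_eq, hxs] at this
              · rcases List.mem_append.mp hx with hx | hx
                · exact htl₂ hx
                · have hxs : x ∈ seen := h6 x htq
                  have := (List.mem_filter.mp hx).2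
                  simp [pvContains_eq, hxs] at this
            · intro x hx
              rcases (PySem.Set.mem_update rest ps x).mp hx with hx | hx
              · exact h8 x (List.mem_cons_of_mem t hx)
              · exact List.mem_cons_of_mem _ (hps_flat x hx)

-- ===== new lemmas: the fixpoint rounds produce the worklist's discovery list =====

theorem pvUpdate_id (a : PySem.Set String) (l : List String) (h : ∀ p ∈ l, p ∈ a) :
    PySem.Set.update a l = a := by
  rw [PySem.Set.update_eq_append_filter]
  have : (PySem.Set.ofList l).filter (fun y => !(PySem.Set.contains a y)) = [] := by
    apply List.filter_eq_nil_iff.mpr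
    intro x hx
    have hxl : x ∈ l := (PySem.Set.mem_ofList _ _).mp hx
    simp [pvContains_eq, h x hxl]
  rw [this, List.append_nil]

theorem pvF_closed (d : List (String × List String)) :
    ∀ (l : List String) (a : PySem.Set String),
      (∀ t ∈ l, ∀ p ∈ PySem.Dict.getD ⟨d⟩ t [], p ∈ a) → pvF d l a = a := by
  intro l
  induction l with
  | nil => intro a _; rfl
  | cons t l ih =>
    intro a h
    show pvF d l (PySem.Set.update a (PySem.Dict.getD ⟨d⟩ t [])) = a
    rw [pvUpdate_id a _ (h t List.mem_cons_self)]
    exact ih a (fun x hx => h x (List.mem_cons_of_mem t hx))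

theorem pvF_mem (d : List (String × List String)) :
    ∀ (l : List String) (a : PySem.Set String) (t : String), t ∈ l →
      ∀ p ∈ PySem.Dict.getD ⟨d⟩ t [], p ∈ pvF d l a := by
  intro l
  induction l with
  | nil => intro a t ht; cases ht
  | cons u l ih =>
    intro a t ht p hp
    rcases List.mem_cons.mp ht with rfl | ht'
    · show p ∈ pvF d l (PySem.Set.update a (PySem.Dict.getD ⟨d⟩ t []))
      obtain ⟨e, he⟩ := pvF_prefix d l (PySem.Set.update a (PySem.Dict.getD ⟨d⟩ t []))
      rw [he]
      exact List.mem_append_left _ ((PySem.Set.mem_update _ _ _).mpr (Or.inr hp))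
    · exact ih _ t ht' p hp

theorem pvF_append (d : List (String × List String)) (l₁ l₂ : List String) (a : PySem.Set String) :
    pvF d (l₁ ++ l₂) a = pvF d l₂ (pvF d l₁ a) := by
  unfold pvF
  rw [List.foldl_append]

theorem pvSeq2_prefix (d : List (String × List String)) :
    ∀ (seen : PySem.Set String) (queue : List String), ∃ e, pvSeq2 d seen queue = seen ++ e := by
  intro seen queue
  fun_induction pvSeq2 d seen queue with
  | case1 seen => exact ⟨[], (List.append_nil seen).symm⟩
  | case2 seen t rest ih =>
    obtain ⟨e, he⟩ := ih
    rw [he, PySem.Set.update_eq_append_filter, List.append_assoc]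
    exact ⟨_, rfl⟩

-- process the whole pending batch in one pvF pass
theorem pvSeq2_batch (d : List (String × List String)) :
    ∀ (b : List String) (s : PySem.Set String) (rest : List String),
      pvSeq2 d s (b ++ rest) = pvSeq2 d (pvF d b s) (rest ++ List.drop s.length (pvF d b s)) := by
  intro b
  induction b with
  | nil =>
    intro s rest
    show pvSeq2 d s rest = pvSeq2 d s (rest ++ List.drop s.length s)
    rw [List.drop_length, List.append_nil]
  | cons t b ih =>
    intro s rest
    have hstep : pvSeq2 d s ((t :: b) ++ rest) =
        pvSeq2 d (PySem.Set.update s (PySem.Dict.getD ⟨d⟩ t []))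
          (b ++ (rest ++ (PySem.Set.ofList (PySem.Dict.getD ⟨d⟩ t [])).filter
            (fun p => !(PySem.Set.contains s p)))) := by
      rw [List.cons_append, pvSeq2, List.append_assoc]
    rw [hstep, ih]
    have hFeq : pvF d (t :: b) s = pvF d b (PySem.Set.update s (PySem.Dict.getD ⟨d⟩ t [])) := rfl
    rw [← hFeq]
    congr 1
    set n := (PySem.Set.ofList (PySem.Dict.getD ⟨d⟩ t [])).filter
      (fun p => !(PySem.Set.contains s p)) with hn
    have hs₁ : PySem.Set.update s (PySem.Dict.getD ⟨d⟩ t []) = s ++ n := by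
      rw [PySem.Set.update_eq_append_filter]
    obtain ⟨e, he⟩ := pvF_prefix d b (PySem.Set.update s (PySem.Dict.getD ⟨d⟩ t []))
    rw [← hFeq] at he
    have he' : pvF d (t :: b) s = s ++ (n ++ e) := by
      rw [he, hs₁, List.append_assoc]
    have h1 : List.drop s.length (pvF d (t :: b) s) = n ++ e := by
      rw [he']; exact List.drop_left
    have h2 : List.drop (PySem.Set.update s (PySem.Dict.getD ⟨d⟩ t [])).length
        (pvF d (t :: b) s) = e := by
      rw [he]; exact List.drop_left
    rw [h1, h2, List.append_assoc]

-- a batch whose parents are all already present is a no-op for the discovery process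
theorem pvSeq2_fixed (d : List (String × List String)) :
    ∀ (b : List String) (r : PySem.Set String), pvF d b r = r → pvSeq2 d r b = r := by
  intro b
  induction b with
  | nil => intro r _; rw [pvSeq2]
  | cons t b ih =>
    intro r h
    have hstep : pvF d b (PySem.Set.update r (PySem.Dict.getD ⟨d⟩ t [])) = r := h
    obtain ⟨e, he⟩ := pvF_prefix d b (PySem.Set.update r (PySem.Dict.getD ⟨d⟩ t []))
    have hr : r = (r ++ (PySem.Set.ofList (PySem.Dict.getD ⟨d⟩ t [])).filter
        (fun p => !(PySem.Set.contains r p))) ++ e := by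
      rw [← PySem.Set.update_eq_append_filter, ← he, hstep]
    have hlen := congrArg List.length hr
    simp only [List.length_append] at hlen
    have hn0 : ((PySem.Set.ofList (PySem.Dict.getD ⟨d⟩ t [])).filter
        (fun p => !(PySem.Set.contains r p))).length = 0 := by omega
    have hnnil := List.length_eq_zero_iff.mp hn0
    have hupd : PySem.Set.update r (PySem.Dict.getD ⟨d⟩ t []) = r := by
      rw [PySem.Set.update_eq_append_filter, hnnil, List.append_nil]
    rw [pvSeq2, hnnil, List.append_nil, hupd]
    apply ih
    rw [hupd] at hstep
    exact hstep

-- the worklist's result is pvF over the still-unprocessed part of the discovery list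
theorem pvBLoop_eq_F (d : List (String × List String)) :
    ∀ (queue : List String) (seen : PySem.Set String) (res : PySem.Set String),
      queue <:+ seen →
      pvBLoop d res queue seen =
        pvF d (List.drop (seen.length - queue.length) (pvSeq2 d seen queue)) res := by
  intro queue seen
  fun_induction pvSeq2 d seen queue with
  | case1 seen =>
    intro res _
    rw [pvBLoop]
    simp [pvF, List.drop_length]
  | case2 seen t rest ih =>
    intro res hsuf
    obtain ⟨pre, hpre⟩ := hsuf
    set ps := PySem.Dict.getD (⟨d⟩ : PySem.Dict String (List String)) t [] with hps
    set n := (PySem.Set.ofList ps).filter (fun p => !(PySem.Set.contains seen p)) with hn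
    have hseen₁ : PySem.Set.update seen ps = seen ++ n := by
      rw [PySem.Set.update_eq_append_filter]
    have hstepB : pvBLoop d res (t :: rest) seen =
        pvBLoop d (PySem.Set.update res ps) (rest ++ n) (PySem.Set.update seen ps) := by
      rw [pvBLoop, pvBInner_eq]
    have hsuf' : (rest ++ n) <:+ PySem.Set.update seen ps := by
      rw [hseen₁, ← hpre]
      exact ⟨pre ++ [t], by simp⟩
    have hlenpre := congrArg List.length hpre
    simp only [List.length_append, List.length_cons] at hlenpre
    have hj : seen.length - (t :: rest).length = pre.length := by
      simp only [List.length_cons]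
      omega
    have hj₁ : (PySem.Set.update seen ps).length - (rest ++ n).length = pre.length + 1 := by
      rw [hseen₁]
      simp only [List.length_append]
      omega
    obtain ⟨e, he⟩ := pvSeq2_prefix d (PySem.Set.update seen ps) (rest ++ n)
    have hS1 : pvSeq2 d (PySem.Set.update seen ps) (rest ++ n) =
        (pre ++ [t]) ++ ((rest ++ n) ++ e) := by
      rw [he, hseen₁, ← hpre]
      simp
    have hdropA : List.drop (seen.length - (t :: rest).length)
        (pvSeq2 d (PySem.Set.update seen ps) (rest ++ n)) = t :: ((rest ++ n) ++ e) := by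
      rw [hj, hS1]
      have hre : (pre ++ [t]) ++ ((rest ++ n) ++ e) = pre ++ (t :: ((rest ++ n) ++ e)) := by simp
      rw [hre, List.drop_left]
    have hdropB : List.drop ((PySem.Set.update seen ps).length - (rest ++ n).length)
        (pvSeq2 d (PySem.Set.update seen ps) (rest ++ n)) = (rest ++ n) ++ e := by
      rw [hj₁, hS1]
      have hl : pre.length + 1 = (pre ++ [t]).length := by simp
      rw [hl, List.drop_left]
    rw [hstepB, ih _ hsuf', hdropB, hdropA]
    rfl

-- fixpoint rounds compute the discovery process; pending is the still-unprocessed suffix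
-- of r, and the parents of the already-processed prefix are all inside r
theorem pvRounds_eq_seq (g : String) (d : List (String × List String)) :
    ∀ (r : List String) (hn : r.Nodup) (hs : r ⊆ g :: d.flatMap Prod.snd)
      (pending : List String), pending <:+ r →
      (∀ t ∈ List.take (r.length - pending.length) r,
        ∀ p ∈ PySem.Dict.getD ⟨d⟩ t [], p ∈ r) →
      pvRounds g d r hn hs = pvSeq2 d r pending := by
  intro r hn hs
  fun_induction pvRounds g d r hn hs with
  | case1 r hn hs he =>
    intro pending hsuf hcp
    obtain ⟨pre, hpre⟩ := hsuf
    have hjr : r.length - pending.length = pre.length := by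
      have := congrArg List.length hpre
      simp only [List.length_append] at this
      omega
    have htake : List.take (r.length - pending.length) r = pre := by
      rw [hjr, ← hpre, List.take_left]
    have hFr : pvF d r r = r := by
      obtain ⟨e, hpe⟩ := pvF_prefix d r r
      have := congrArg List.length hpe
      simp only [List.length_append] at this
      have : e = [] := List.length_eq_zero_iff.mp (by omega)
      rw [hpe, this, List.append_nil]
    have hFpre : pvF d pre r = r := by
      apply pvF_closed
      intro x hx
      exact hcp x (htake ▸ hx)
    have hFpending : pvF d pending r = r := by
      have : pvF d r r = pvF d pending (pvF d pre r) := by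
        rw [← pvF_append, hpre]
      rw [hFr, hFpre] at this
      exact this.symm
    exact (pvSeq2_fixed d pending r hFpending).symm
  | case2 r hn hs he ih =>
    intro pending hsuf hcp
    obtain ⟨pre, hpre⟩ := hsuf
    have hjr : r.length - pending.length = pre.length := by
      have := congrArg List.length hpre
      simp only [List.length_append] at this
      omega
    have htake : List.take (r.length - pending.length) r = pre := by
      rw [hjr, ← hpre, List.take_left]
    have hFpre : pvF d pre r = r := by
      apply pvF_closed
      intro x hx
      exact hcp x (htake ▸ hx)
    have hFpending : pvF d pending r = pvF d r r := by
      have h1 : pvF d r r = pvF d pending (pvF d pre r) := by rw [← pvF_append, hpre]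
      rw [hFpre] at h1
      exact h1.symm
    obtain ⟨x, hx⟩ := pvF_prefix d r r
    have hrsub : r.length ≤ (pvF d r r).length := by
      rw [hx]; simp
    have hbatch : pvSeq2 d r pending =
        pvSeq2 d (pvF d r r) (List.drop r.length (pvF d r r)) := by
      have := pvSeq2_batch d pending r []
      rw [List.append_nil, List.nil_append] at this
      rw [this, hFpending]
    rw [hbatch]
    apply ih
    · exact List.drop_suffix _ _
    · have hjE : (pvF d r r).length - (List.drop r.length (pvF d r r)).length = r.length := by
        rw [List.length_drop]
        omega
      rw [hjE]
      have htakeE : List.take r.length (pvF d r r) = r := by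
        rw [hx, List.take_left]
      rw [htakeE]
      intro t ht p hp
      rcases List.mem_append.mp (hpre ▸ ht) with htpre | htpend
      · have : p ∈ r := hcp t (htake ▸ htpre) p hp
        rw [hx]; exact List.mem_append_left _ this
      · rw [← hFpending]
        exact pvF_mem d pending r t htpend p hp

-- ===== VERDICT (by name: the statement is the Claim_ definition above) =====
theorem get_all_parents_of_term_spec : Claim_equal_get_all_parents_of_term := by
  intro go_id d include_self _
  unfold Spec_get_all_parents_of_term get_all_parents_of_term get_all_parents_of_term_alt
  simp only []
  have hq : (PySem.Set.add PySem.Set.empty go_id : List String) = [go_id] := rfl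
  have hA : pvALoop d (if include_self then PySem.Set.add PySem.Set.empty go_id else PySem.Set.empty)
      (PySem.Set.add PySem.Set.empty go_id) PySem.Set.empty =
      pvBLoop d (if include_self then PySem.Set.add PySem.Set.empty go_id else PySem.Set.empty)
        [go_id] [go_id] := by
    rw [hq]
    apply pvSim go_id d (pvM go_id d PySem.Set.empty [go_id]) _ _ _ _ _ _ (le_refl _)
    refine ⟨rfl, ?_, ?_, ?_, ?_, ?_, ?_, ?_⟩
    · unfold pvEffA pvEffB
      apply List.filter_congr
      intro x _
      simp [pvContains_eq, PySem.Set.empty]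
    · intro p _
      simp [PySem.Set.empty]
    · simp
    · simp
    · intro x hx; simpa using hx
    · intro x hx _
      simp [PySem.Set.empty]
    · intro x hx
      simp only [List.mem_singleton] at hx
      subst hx
      exact List.mem_cons_self
  have hB : pvBLoop d (if include_self then PySem.Set.add PySem.Set.empty go_id else PySem.Set.empty)
      [go_id] [go_id] =
      pvF d (pvSeq2 d [go_id] [go_id])
        (if include_self then PySem.Set.add PySem.Set.empty go_id else PySem.Set.empty) := by
    have := pvBLoop_eq_F d [go_id] [go_id]
      (if include_self then PySem.Set.add PySem.Set.empty go_id else PySem.Set.empty)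
      (List.suffix_refl _)
    simpa using this
  have hR : pvRounds go_id d [go_id] (List.nodup_singleton _)
      (fun x hx => by rw [List.mem_singleton] at hx; exact hx ▸ List.mem_cons_self) =
      pvSeq2 d [go_id] [go_id] := by
    apply pvRounds_eq_seq go_id d [go_id] _ _ [go_id] (List.suffix_refl _)
    intro t ht
    simp at ht
  rw [hA, hB, ← hR]
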